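-- pv_equiv track=rewrite | github.com/piter239/Advent_of_Code_2022 | solution18.py | get_air_neighbors
-- ===== SOURCE A (Python) =====
-- Neighborhood3D = [(1, 0, 0), (-1, 0, 0), (0, 1, 0), (0, -1, 0), (0, 0, 1), (0, 0, -1)]
--
-- def get_air_neighbors(solid_cubes, x, y, z, d=1):
--     ''''''
--     neighbors = set()
--
--     # Loop through each potential neighbor
--     for dx, dy, dz in Neighborhood3D:
--         # Calculate the coordinates of the neighbor
--         nx, ny, nz = x + dx, y + dy, z + dz
--         # Check if the neighbor is within the maximum distance
--         if (nx, ny, nz) not in solid_cubes: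
--             neighbors.add((nx, ny, nz))
--             if d > 1:
--                 neighbors |= get_air_neighbors(solid_cubes, nx, ny, nz, d - 1)
--
--     return neighbors
-- ===== SOURCE B (Python) =====
-- # BFS over air cells with a visited set instead of A's path-redundant recursion;
-- # one ring is always expanded (A expands max(d,1) levels since its loop runs before the d>1 test).
-- Neighborhood3D = [(1, 0, 0), (-1, 0, 0), (0, 1, 0), (0, -1, 0), (0, 0, 1), (0, 0, -1)]
--
-- def get_air_neighbors(solid_cubes, x, y, z, d=1):
--     visited = set()
--     frontier = [(x, y, z)]
--     rounds = d if d > 1 else 1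
--     while rounds > 0 and frontier:
--         nxt = []
--         for (cx, cy, cz) in frontier:
--             for dx, dy, dz in Neighborhood3D:
--                 n = (cx + dx, cy + dy, cz + dz)
--                 if n not in solid_cubes and n not in visited:
--                     visited.add(n)
--                     nxt.append(n)
--         frontier = nxt
--         rounds -= 1
--     return visited
-- ===== Notes on version B (the rewrite author's own statement) =====
-- stated objective: alternative
-- what changed: A's depth-d recursion re-explores cells once per path to them (exponential in d); B traverses breadth-first with a single visited set, touching each cell within radius d at most once (a timing run's verdict on speed varied between runs, so no speed claim is made); both Pythons return a set, so both Lean ports return its sorted element list as the canonical representative. …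
import Mathlib
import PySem

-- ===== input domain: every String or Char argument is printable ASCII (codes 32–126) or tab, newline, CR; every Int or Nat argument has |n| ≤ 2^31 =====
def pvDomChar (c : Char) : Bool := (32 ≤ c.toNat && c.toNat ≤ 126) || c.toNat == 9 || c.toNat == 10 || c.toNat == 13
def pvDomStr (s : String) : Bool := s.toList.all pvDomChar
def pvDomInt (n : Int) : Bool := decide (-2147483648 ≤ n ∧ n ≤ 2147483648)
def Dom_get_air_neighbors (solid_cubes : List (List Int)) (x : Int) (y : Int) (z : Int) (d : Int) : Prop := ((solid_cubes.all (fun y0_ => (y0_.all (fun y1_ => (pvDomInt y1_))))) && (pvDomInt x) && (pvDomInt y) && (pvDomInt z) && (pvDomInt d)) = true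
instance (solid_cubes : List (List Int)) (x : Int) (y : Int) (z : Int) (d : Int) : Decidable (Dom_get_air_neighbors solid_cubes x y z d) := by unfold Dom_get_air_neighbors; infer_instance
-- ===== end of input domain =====

-- B replaces A's path-redundant depth-d recursion by a breadth-first search with a visited
-- set; both Pythons return a SET (hash order not modelled), so both ports return the sorted
-- list of its elements as the canonical representative (outputs are compared as sets).

-- shared helper: a coordinate triple as the 3-element list Python's tuple corresponds to
def pvTl (p : Int × Int × Int) : List Int := [p.1, p.2.1, p.2.2]

-- shared helper: canonical (sorted) list of a set's elements (Python hash order is not modelled)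
def pvCanon (l : List (List Int)) : List (List Int) :=
  @PySem.List.sorted (List Int) (List Int) List.instLinearOrder.toLT
    (@LinearOrder.toDecidableLT _ List.instLinearOrder) l (fun w => w) false

-- ===== PORT A =====
def pyNeighborhood3D : List (Int × Int × Int) :=
  [(1, 0, 0), (-1, 0, 0), (0, 1, 0), (0, -1, 0), (0, 0, 1), (0, 0, -1)]

-- the 'for dx, dy, dz in Neighborhood3D' loop of A, with 'recur' the recursive call
def ganLoop (solid : List (List Int)) (recur : Int → Int → Int → PySem.Set (List Int))
    (x y z d : Int) : List (Int × Int × Int) → PySem.Set (List Int) → PySem.Set (List Int)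
  | [], nb => nb
  | t :: ts, nb =>
    let nx := x + t.1
    let ny := y + t.2.1
    let nz := z + t.2.2
    ganLoop solid recur x y z d ts
      (if [nx, ny, nz] ∈ solid then nb
       else
         let nb1 := nb.add [nx, ny, nz]
         if 1 < d then nb1.union (recur nx ny nz) else nb1)

-- A's recursion; 'fuel' (= max d 1 at every call) only makes the recursion structural
def ganAux (solid : List (List Int)) : Nat → Int → Int → Int → Int → PySem.Set (List Int)
  | 0, _, _, _, _ => PySem.Set.empty
  | fuel + 1, x, y, z, d =>
    ganLoop solid (fun nx ny nz => ganAux solid fuel nx ny nz (d - 1)) x y z d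
      pyNeighborhood3D PySem.Set.empty

def get_air_neighbors (solid_cubes : List (List Int)) (x : Int) (y : Int) (z : Int) (d : Int) :
    List (List Int) :=
  pvCanon (ganAux solid_cubes (max d 1).toNat x y z d)

-- ===== PORT B =====
-- inner 'for dx, dy, dz in Neighborhood3D' loop of Source B, state = (visited, nxt)
def bfsCell (solid : List (List Int)) (c : Int × Int × Int) :
    List (Int × Int × Int) → PySem.Set (List Int) × List (Int × Int × Int) →
    PySem.Set (List Int) × List (Int × Int × Int)
  | [], st => st
  | t :: ts, st =>
    let n := (c.1 + t.1, c.2.1 + t.2.1, c.2.2 + t.2.2)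
    bfsCell solid c ts
      (if pvTl n ∉ solid ∧ pvTl n ∉ st.1 then (st.1.add (pvTl n), st.2 ++ [n]) else st)

-- 'for (cx, cy, cz) in frontier'
def bfsExpand (solid : List (List Int)) :
    List (Int × Int × Int) → PySem.Set (List Int) × List (Int × Int × Int) →
    PySem.Set (List Int) × List (Int × Int × Int)
  | [], st => st
  | c :: cs, st => bfsExpand solid cs (bfsCell solid c pyNeighborhood3D st)

-- 'while rounds > 0 and frontier'
def bfsLoop (solid : List (List Int)) :
    Nat → PySem.Set (List Int) → List (Int × Int × Int) → PySem.Set (List Int)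
  | 0, visited, _ => visited
  | rounds + 1, visited, frontier =>
    if frontier = [] then visited
    else
      let st := bfsExpand solid frontier (visited, [])
      bfsLoop solid rounds st.1 st.2

def get_air_neighbors_alt (solid_cubes : List (List Int)) (x : Int) (y : Int) (z : Int) (d : Int) :
    List (List Int) :=
  pvCanon (bfsLoop solid_cubes (max d 1).toNat PySem.Set.empty [(x, y, z)])

-- ===== PRECONDITION & SPEC =====
-- the six axis offsets, for Pre_ (kept separate from the ports' constant)
def pvOff : List (Int × Int × Int) :=
  [(1, 0, 0), (-1, 0, 0), (0, 1, 0), (0, -1, 0), (0, 0, 1), (0, 0, -1)]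

-- Pre_ excludes exactly the inputs on which Python A raises RecursionError: d ≥ 998 (CPython's
-- default 1000-frame recursion limit, threshold measured) while the start cell can reach a pair
-- of adjacent non-solid cells, which lets A's memoless DFS ping-pong and nest ~d frames; when
-- all six neighbours are solid, or the start cell is solid and each of its non-solid neighbours
-- is fully walled in, the recursion nests at most 2 frames and A returns for every d.
def Pre_get_air_neighbors (solid_cubes : List (List Int)) (x : Int) (y : Int) (z : Int) (d : Int) : Prop :=
  d ≤ 997 ∨
  (∀ t ∈ pvOff, [x + t.1, y + t.2.1, z + t.2.2] ∈ solid_cubes) ∨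
  ([x, y, z] ∈ solid_cubes ∧
    ∀ t ∈ pvOff, [x + t.1, y + t.2.1, z + t.2.2] ∉ solid_cubes →
      ∀ u ∈ pvOff, [x + t.1 + u.1, y + t.2.1 + u.2.1, z + t.2.2 + u.2.2] ∈ solid_cubes)
instance (solid_cubes : List (List Int)) (x : Int) (y : Int) (z : Int) (d : Int) : Decidable (Pre_get_air_neighbors solid_cubes x y z d) := by unfold Pre_get_air_neighbors; infer_instance
def pvWitness_get_air_neighbors : List (List Int) × Int × Int × Int × Int := ([[0, 1, 0]], 0, 0, 0, 2)
def Spec_get_air_neighbors (solid_cubes : List (List Int)) (x : Int) (y : Int) (z : Int) (d : Int) (out : List (List Int)) : Prop := out = get_air_neighbors_alt solid_cubes x y z d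
instance (solid_cubes : List (List Int)) (x : Int) (y : Int) (z : Int) (d : Int) (out : List (List Int)) : Decidable (Spec_get_air_neighbors solid_cubes x y z d out) := by unfold Spec_get_air_neighbors; infer_instance

-- ===== CLAIM (what is proved, stated in full; the proofs are below) =====
def Claim_equal_get_air_neighbors : Prop := ∀ (solid_cubes : List (List Int)) (x : Int) (y : Int) (z : Int) (d : Int), Dom_get_air_neighbors solid_cubes x y z d → Pre_get_air_neighbors solid_cubes x y z d → Spec_get_air_neighbors solid_cubes x y z d (get_air_neighbors solid_cubes x y z d)

-- ===== LEMMAS AND PROOFS =====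

def pvStep (p t : Int × Int × Int) : Int × Int × Int := (p.1 + t.1, p.2.1 + t.2.1, p.2.2 + t.2.2)

-- one air-neighbour expansion of a set of cells
def pvAirN (solid : List (List Int)) (S : Int × Int × Int → Prop) (q : Int × Int × Int) : Prop :=
  pvTl q ∉ solid ∧ ∃ p, S p ∧ ∃ t ∈ pyNeighborhood3D, q = pvStep p t

def pvLvlS (solid : List (List Int)) (S : Int × Int × Int → Prop) : Nat → Int × Int × Int → Prop
  | 0 => S
  | k + 1 => pvAirN solid (pvLvlS solid S k)

def pvLvl (solid : List (List Int)) (p0 : Int × Int × Int) (k : Nat) : Int × Int × Int → Prop :=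
  pvLvlS solid (fun r => r = p0) k

-- A's effective expansion depth
def pvDf (d : Int) : Nat := if d ≤ 1 then 1 else d.toNat

theorem pvTl_inj : Function.Injective pvTl := by
  intro p q h
  simp [pvTl] at h
  exact Prod.ext h.1 (Prod.ext h.2.1 h.2.2)

theorem pvAirN_congr {solid : List (List Int)} {S S' : Int × Int × Int → Prop}
    (h : ∀ r, S r ↔ S' r) (q : Int × Int × Int) : pvAirN solid S q ↔ pvAirN solid S' q := by
  unfold pvAirN
  constructor <;> rintro ⟨ha, p, hp, t, ht, he⟩
  · exact ⟨ha, p, (h p).mp hp, t, ht, he⟩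
  · exact ⟨ha, p, (h p).mpr hp, t, ht, he⟩

theorem pvAirN_mono {solid : List (List Int)} {S S' : Int × Int × Int → Prop}
    (h : ∀ r, S r → S' r) {q : Int × Int × Int} : pvAirN solid S q → pvAirN solid S' q := by
  rintro ⟨ha, p, hp, t, ht, he⟩
  exact ⟨ha, p, h p hp, t, ht, he⟩

theorem pvLvlS_shift (solid : List (List Int)) (S : Int × Int × Int → Prop) :
    ∀ k q, pvLvlS solid S (k + 1) q ↔ pvLvlS solid (pvAirN solid S) k q := by
  intro k
  induction k with
  | zero => intro q; exact Iff.rfl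
  | succ k ih =>
    intro q
    show pvAirN solid (pvLvlS solid S (k + 1)) q ↔ pvAirN solid (pvLvlS solid (pvAirN solid S) k) q
    exact pvAirN_congr ih q

theorem pvLvlS_union (solid : List (List Int)) :
    ∀ (k : Nat) (S : Int × Int × Int → Prop) (q : Int × Int × Int),
      pvLvlS solid S k q ↔ ∃ p, S p ∧ pvLvl solid p k q := by
  intro k
  induction k with
  | zero =>
    intro S q
    constructor
    · intro h; exact ⟨q, h, rfl⟩
    · rintro ⟨p, hp, rfl⟩; exact hp
  | succ k ih =>
    intro S q
    show pvAirN solid (pvLvlS solid S k) q ↔ _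
    constructor
    · rintro ⟨ha, r, hr, t, ht, he⟩
      obtain ⟨p, hp, hlp⟩ := (ih S r).mp hr
      exact ⟨p, hp, ha, r, hlp, t, ht, he⟩
    · rintro ⟨p, hp, ha, r, hr, t, ht, he⟩
      exact ⟨ha, r, (ih S r).mpr ⟨p, hp, hr⟩, t, ht, he⟩

-- first-step decomposition of a level
theorem pvLvl_decomp (solid : List (List Int)) (p0 : Int × Int × Int) (k : Nat) (q : Int × Int × Int) :
    pvLvl solid p0 (k + 1) q ↔
      ∃ n, pvAirN solid (fun r => r = p0) n ∧ pvLvl solid n k q := by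
  unfold pvLvl
  rw [pvLvlS_shift, pvLvlS_union]
  exact Iff.rfl

theorem pvDf_pos (d : Int) : 1 ≤ pvDf d := by unfold pvDf; split <;> omega

theorem pvDf_succ {d : Int} (h : 1 < d) : pvDf (d - 1) + 1 = pvDf d := by
  unfold pvDf; split <;> split <;> omega

theorem pvDf_max (d : Int) : (max d 1).toNat = pvDf d := by unfold pvDf; split <;> omega

-- ---- A-side characterisation ----

theorem mem_ganLoop (solid : List (List Int)) (recur : Int → Int → Int → PySem.Set (List Int))
    (x y z d : Int) :
    ∀ (dirs : List (Int × Int × Int)) (nb : PySem.Set (List Int)) (w : List Int),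
      w ∈ ganLoop solid recur x y z d dirs nb ↔
        w ∈ nb ∨ ∃ t ∈ dirs, pvTl (pvStep (x, y, z) t) ∉ solid ∧
          (w = pvTl (pvStep (x, y, z) t) ∨ (1 < d ∧ w ∈ recur (x + t.1) (y + t.2.1) (z + t.2.2))) := by
  intro dirs
  induction dirs with
  | nil => intro nb w; simp [ganLoop]
  | cons t ts ih =>
    intro nb w
    show w ∈ ganLoop solid recur x y z d ts _ ↔ _
    rw [ih]
    by_cases hs : [x + t.1, y + t.2.1, z + t.2.2] ∈ solid
    · simp only [if_pos hs]
      constructor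
      · rintro (h | h)
        · exact Or.inl h
        · exact Or.inr (by rcases h with ⟨t', ht', h⟩; exact ⟨t', List.mem_cons_of_mem _ ht', h⟩)
      · rintro (h | ⟨t', ht', hair, h⟩)
        · exact Or.inl h
        · rcases List.mem_cons.mp ht' with rfl | ht'
          · exact absurd hs (by simpa [pvTl, pvStep] using hair)
          · exact Or.inr ⟨t', ht', hair, h⟩
    · simp only [if_neg hs]
      have hair : pvTl (pvStep (x, y, z) t) ∉ solid := by simpa [pvTl, pvStep] using hs
      by_cases hd : 1 < d
      · simp only [if_pos hd, PySem.Set.mem_union, PySem.Set.mem_add]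
        constructor
        · rintro (((h | rfl) | h) | ⟨t', ht', h⟩)
          · exact Or.inl h
          · exact Or.inr ⟨t, List.mem_cons_self .., hair, Or.inl (by simp [pvTl, pvStep])⟩
          · exact Or.inr ⟨t, List.mem_cons_self .., hair, Or.inr ⟨hd, h⟩⟩
          · exact Or.inr ⟨t', List.mem_cons_of_mem _ ht', h⟩
        · rintro (h | ⟨t', ht', hair', h⟩)
          · exact Or.inl (Or.inl (Or.inl h))
          · rcases List.mem_cons.mp ht' with rfl | ht'
            · rcases h with rfl | ⟨_, h⟩
              · exact Or.inl (Or.inl (Or.inr (by simp [pvTl, pvStep])))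
              · exact Or.inl (Or.inr h)
            · exact Or.inr ⟨t', ht', hair', h⟩
      · simp only [if_neg hd, PySem.Set.mem_add]
        constructor
        · rintro ((h | rfl) | ⟨t', ht', h⟩)
          · exact Or.inl h
          · exact Or.inr ⟨t, List.mem_cons_self .., hair, Or.inl (by simp [pvTl, pvStep])⟩
          · exact Or.inr ⟨t', List.mem_cons_of_mem _ ht', h⟩
        · rintro (h | ⟨t', ht', hair', h⟩)
          · exact Or.inl (Or.inl h)
          · rcases List.mem_cons.mp ht' with rfl | ht'
            · rcases h with rfl | ⟨hd', _⟩
              · exact Or.inl (Or.inr (by simp [pvTl, pvStep]))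
              · exact absurd hd' hd
            · exact Or.inr ⟨t', ht', hair', h⟩

theorem nodup_ganLoop (solid : List (List Int)) (recur : Int → Int → Int → PySem.Set (List Int))
    (x y z d : Int) :
    ∀ (dirs : List (Int × Int × Int)) (nb : PySem.Set (List Int)), nb.Nodup →
      (ganLoop solid recur x y z d dirs nb).Nodup := by
  intro dirs
  induction dirs with
  | nil => intro nb h; exact h
  | cons t ts ih =>
    intro nb h
    apply ih
    split
    · exact h
    · split
      · exact PySem.Set.nodup_union _ _ (PySem.Set.nodup_add _ _ h)
      · exact PySem.Set.nodup_add _ _ h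

theorem nodup_ganAux (solid : List (List Int)) :
    ∀ (fuel : Nat) (x y z d : Int), (ganAux solid fuel x y z d).Nodup := by
  intro fuel
  cases fuel with
  | zero => intro x y z d; exact List.nodup_nil
  | succ f => intro x y z d; exact nodup_ganLoop _ _ _ _ _ _ _ _ List.nodup_nil

theorem mem_ganAux (solid : List (List Int)) :
    ∀ (fuel : Nat) (x y z d : Int), fuel = pvDf d →
      ∀ w, w ∈ ganAux solid fuel x y z d ↔
        ∃ k, 1 ≤ k ∧ k ≤ pvDf d ∧ ∃ q, pvLvl solid (x, y, z) k q ∧ w = pvTl q := by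
  intro fuel
  induction fuel with
  | zero => intro x y z d hf; exact absurd hf.symm (by have := pvDf_pos d; omega)
  | succ f ih =>
    intro x y z d hf w
    show w ∈ ganLoop solid _ x y z d pyNeighborhood3D PySem.Set.empty ↔ _
    rw [mem_ganLoop]
    simp only [PySem.Set.empty, List.not_mem_nil, false_or]
    constructor
    · rintro ⟨t, ht, hair, h | ⟨hd, h⟩⟩
      · exact ⟨1, le_refl 1, pvDf_pos d, pvStep (x, y, z) t,
          ⟨hair, (x, y, z), rfl, t, ht, rfl⟩, h⟩
      · have hfd : f = pvDf (d - 1) := by have := pvDf_succ hd; omega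
        obtain ⟨k, hk1, hk2, q, hq, hw⟩ := (ih _ _ _ _ hfd w).mp h
        refine ⟨k + 1, by omega, by have := pvDf_succ hd; omega, q, ?_, hw⟩
        exact (pvLvl_decomp solid (x, y, z) k q).mpr
          ⟨pvStep (x, y, z) t, ⟨hair, (x, y, z), rfl, t, ht, rfl⟩, by
            simpa [pvStep] using hq⟩
    · rintro ⟨k, hk1, hk2, q, hq, hw⟩
      cases k with
      | zero => omega
      | succ k =>
        obtain ⟨n, ⟨hna, p, rfl, t, ht, rfl⟩, hnl⟩ := (pvLvl_decomp solid (x, y, z) k q).mp hq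
        cases k with
        | zero =>
          obtain rfl : q = pvStep (x, y, z) t := hnl
          exact ⟨t, ht, hna, Or.inl hw⟩
        | succ k =>
          have hd : 1 < d := by
            by_contra hd
            have h1 : pvDf d = 1 := by unfold pvDf; split <;> omega
            omega
          have hfd : f = pvDf (d - 1) := by have := pvDf_succ hd; omega
          refine ⟨t, ht, hna, Or.inr ⟨hd, ?_⟩⟩
          refine (ih _ _ _ _ hfd w).mpr ⟨k + 1, by omega, by have := pvDf_succ hd; omega, q, ?_, hw⟩
          simpa [pvStep] using hnl

-- ---- B-side characterisation ----

-- loop invariant of one expansion round (V0 = visited before the round, S = candidates seen)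
def pvInv (V0 : List (List Int)) (S : Int × Int × Int → Prop)
    (st : PySem.Set (List Int) × List (Int × Int × Int)) : Prop :=
  (∀ w, w ∈ st.1 ↔ w ∈ V0 ∨ ∃ q ∈ st.2, w = pvTl q) ∧
  st.2.Nodup ∧
  (∀ q, q ∈ st.2 ↔ (S q ∧ pvTl q ∉ V0)) ∧
  st.1.Nodup

theorem pvInv_congr {V0 : List (List Int)} {S S' : Int × Int × Int → Prop}
    {st : PySem.Set (List Int) × List (Int × Int × Int)}
    (h : ∀ q, S q ↔ S' q) : pvInv V0 S st → pvInv V0 S' st := by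
  rintro ⟨h1, h2, h3, h4⟩
  exact ⟨h1, h2, fun q => (h3 q).trans (by rw [h q]), h4⟩

theorem bfsCell_inv (solid V0 : List (List Int)) (c : Int × Int × Int) :
    ∀ (dirs : List (Int × Int × Int)) (st : PySem.Set (List Int) × List (Int × Int × Int))
      (S : Int × Int × Int → Prop), pvInv V0 S st →
      pvInv V0
        (fun q => S q ∨ (pvTl q ∉ solid ∧ ∃ t ∈ dirs, q = pvStep c t))
        (bfsCell solid c dirs st) := by
  intro dirs
  induction dirs with
  | nil =>
    intro st S h
    exact pvInv_congr (by simp) h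
  | cons t ts ih =>
    intro st S h
    show pvInv _ _ (bfsCell solid c ts _)
    have step : pvInv V0 (fun q => S q ∨ (pvTl q ∉ solid ∧ q = pvStep c t))
        (if pvTl (c.1 + t.1, c.2.1 + t.2.1, c.2.2 + t.2.2) ∉ solid ∧
            pvTl (c.1 + t.1, c.2.1 + t.2.1, c.2.2 + t.2.2) ∉ st.1
         then (st.1.add (pvTl (c.1 + t.1, c.2.1 + t.2.1, c.2.2 + t.2.2)),
               st.2 ++ [(c.1 + t.1, c.2.1 + t.2.1, c.2.2 + t.2.2)])
         else st) := by
      obtain ⟨h1, h2, h3, h4⟩ := h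
      have hstep : (c.1 + t.1, c.2.1 + t.2.1, c.2.2 + t.2.2) = pvStep c t := rfl
      split
      · rename_i hcond
        obtain ⟨hair, hnv⟩ := hcond
        refine ⟨?_, ?_, ?_, PySem.Set.nodup_add _ _ h4⟩
        · intro w
          rw [PySem.Set.mem_add, h1 w]
          simp only [List.mem_append, List.mem_singleton]
          constructor
          · rintro ((hv | ⟨q, hq, rfl⟩) | rfl)
            · exact Or.inl hv
            · exact Or.inr ⟨q, Or.inl hq, rfl⟩
            · exact Or.inr ⟨_, Or.inr rfl, rfl⟩
          · rintro (hv | ⟨q, hq | rfl, rfl⟩)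
            · exact Or.inl (Or.inl hv)
            · exact Or.inl (Or.inr ⟨q, hq, rfl⟩)
            · exact Or.inr rfl
        · refine List.Nodup.append h2 (List.nodup_singleton _) ?_
          intro q hq hq'
          rw [List.mem_singleton] at hq'
          subst hq'
          exact hnv ((h1 _).mpr (Or.inr ⟨_, hq, rfl⟩))
        · intro q
          simp only [List.mem_append, List.mem_singleton, h3 q]
          constructor
          · rintro (⟨hs, hnv0⟩ | rfl)
            · exact ⟨Or.inl hs, hnv0⟩
            · rw [hstep]
              exact ⟨Or.inr ⟨by rw [← hstep]; exact hair, rfl⟩,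
                fun hv0 => hnv ((h1 _).mpr (Or.inl (by rw [← hstep] at hv0; exact hv0)))⟩
          · rintro ⟨hs | ⟨_, rfl⟩, hnv0⟩
            · exact Or.inl ⟨hs, hnv0⟩
            · exact Or.inr hstep.symm
      · rename_i hcond
        rw [not_and_or, not_not, not_not] at hcond
        refine ⟨h1, h2, ?_, h4⟩
        intro q
        rw [h3 q]
        constructor
        · rintro ⟨hs, hnv0⟩; exact ⟨Or.inl hs, hnv0⟩
        · rintro ⟨hs | ⟨hair, rfl⟩, hnv0⟩
          · exact ⟨hs, hnv0⟩
          · rcases hcond with hsol | hv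
            · exact absurd (by rw [hstep] at hsol; exact hsol) hair
            · rw [hstep] at hv
              rcases (h1 _).mp hv with hv0 | ⟨q', hq', he⟩
              · exact absurd hv0 hnv0
              · have : q' = pvStep c t := pvTl_inj he.symm
                subst this
                exact ⟨((h3 _).mp hq').1, hnv0⟩
    have := ih _ _ step
    refine pvInv_congr ?_ this
    intro q
    simp only [List.mem_cons]
    constructor
    · rintro ((hs | ⟨ha, rfl⟩) | ⟨ha, t', ht', rfl⟩)
      · exact Or.inl hs
      · exact Or.inr ⟨ha, t, Or.inl rfl, rfl⟩
      · exact Or.inr ⟨ha, t', Or.inr ht', rfl⟩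
    · rintro (hs | ⟨ha, t', rfl | ht', rfl⟩)
      · exact Or.inl (Or.inl hs)
      · exact Or.inl (Or.inr ⟨ha, rfl⟩)
      · exact Or.inr ⟨ha, t', ht', rfl⟩

theorem bfsExpand_inv (solid V0 : List (List Int)) :
    ∀ (cells : List (Int × Int × Int)) (st : PySem.Set (List Int) × List (Int × Int × Int))
      (S : Int × Int × Int → Prop), pvInv V0 S st →
      pvInv V0
        (fun q => S q ∨ (pvTl q ∉ solid ∧ ∃ c ∈ cells, ∃ t ∈ pyNeighborhood3D, q = pvStep c t))
        (bfsExpand solid cells st) := by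
  intro cells
  induction cells with
  | nil =>
    intro st S h
    exact pvInv_congr (by simp) h
  | cons c cs ih =>
    intro st S h
    show pvInv _ _ (bfsExpand solid cs _)
    have := ih _ _ (bfsCell_inv solid V0 c pyNeighborhood3D st S h)
    refine pvInv_congr ?_ this
    intro q
    simp only [List.mem_cons]
    constructor
    · rintro ((hs | ⟨ha, t, ht, rfl⟩) | ⟨ha, c', hc', t, ht, rfl⟩)
      · exact Or.inl hs
      · exact Or.inr ⟨ha, c, Or.inl rfl, t, ht, rfl⟩
      · exact Or.inr ⟨ha, c', Or.inr hc', t, ht, rfl⟩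
    · rintro (hs | ⟨ha, c', rfl | hc', t, ht, rfl⟩)
      · exact Or.inl (Or.inl hs)
      · exact Or.inl (Or.inr ⟨ha, t, ht, rfl⟩)
      · exact Or.inr ⟨ha, c', hc', t, ht, rfl⟩

-- once a level is absorbed by earlier levels, every later level is too
theorem pvAbsorb (solid : List (List Int)) (p0 : Int × Int × Int) (k : Nat)
    (hk : ∀ q, pvLvl solid p0 k q → ∃ j, 1 ≤ j ∧ j ≤ k - 1 ∧ pvLvl solid p0 j q) :
    ∀ m, 1 ≤ m → ∀ q, pvLvl solid p0 m q → ∃ j, 1 ≤ j ∧ j ≤ k - 1 ∧ pvLvl solid p0 j q := by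
  intro m
  induction m using Nat.strong_induction_on with
  | _ m ihm =>
    intro hm q hq
    by_cases hmk : m ≤ k - 1
    · exact ⟨m, hm, hmk, hq⟩
    · by_cases hmk2 : m = k
      · exact hk q (hmk2 ▸ hq)
      · have hmk3 : k < m := by omega
        cases m with
        | zero => omega
        | succ m' =>
          obtain ⟨ha, p, hp, t, ht, he⟩ := (hq : pvAirN solid (pvLvl solid p0 m') q)
          cases Nat.eq_zero_or_pos m' with
          | inl h0 =>
            subst h0
            have hk0 : k = 0 := by omega
            subst hk0
            obtain ⟨j, hj1, hj2, _⟩ := hk p0 (show p0 = p0 from rfl)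
            omega
          | inr h1 =>
            obtain ⟨j, hj1, hj2, hjl⟩ := ihm m' (by omega) h1 p hp
            have hq' : pvLvl solid p0 (j + 1) q := ⟨ha, p, hjl, t, ht, he⟩
            by_cases hjk : j + 1 ≤ k - 1
            · exact ⟨j + 1, by omega, hjk, hq'⟩
            · have : j + 1 = k := by omega
              exact hk q (this ▸ hq')

theorem mem_bfsLoop (solid : List (List Int)) (p0 : Int × Int × Int) :
    ∀ (steps k : Nat) (V : PySem.Set (List Int)) (F : List (Int × Int × Int)),
      V.Nodup → F.Nodup →
      (∀ q ∈ F, pvLvl solid p0 k q) →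
      (∀ q, pvLvl solid p0 k q → q ∈ F ∨ ∃ j, 1 ≤ j ∧ j ≤ k - 1 ∧ pvLvl solid p0 j q) →
      (∀ w, w ∈ V ↔ ∃ j, 1 ≤ j ∧ j ≤ k ∧ ∃ q, pvLvl solid p0 j q ∧ w = pvTl q) →
      (bfsLoop solid steps V F).Nodup ∧
      (∀ w, w ∈ bfsLoop solid steps V F ↔
        ∃ j, 1 ≤ j ∧ j ≤ k + steps ∧ ∃ q, pvLvl solid p0 j q ∧ w = pvTl q) := by
  intro steps
  induction steps with
  | zero =>
    intro k V F hV hF ha hb hc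
    exact ⟨hV, fun w => by simpa using hc w⟩
  | succ steps ih =>
    intro k V F hV hF ha hb hc
    by_cases hFe : F = []
    · have hres : bfsLoop solid (steps + 1) V F = V := by simp [bfsLoop, hFe]
      rw [hres]
      refine ⟨hV, fun w => ?_⟩
      rw [hc w]
      constructor
      · rintro ⟨j, hj1, hj2, hq⟩; exact ⟨j, hj1, by omega, hq⟩
      · rintro ⟨j, hj1, hj2, q, hq, hw⟩
        by_cases hjk : j ≤ k
        · exact ⟨j, hj1, hjk, q, hq, hw⟩
        · have hk' : ∀ r, pvLvl solid p0 k r → ∃ j', 1 ≤ j' ∧ j' ≤ k - 1 ∧ pvLvl solid p0 j' r := by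
            intro r hr
            rcases hb r hr with hmem | h
            · rw [hFe] at hmem; exact absurd hmem (List.not_mem_nil)
            · exact h
          obtain ⟨j', hj'1, hj'2, hj'l⟩ := pvAbsorb solid p0 k hk' j hj1 q hq
          exact ⟨j', hj'1, by omega, q, hj'l, hw⟩
    · have hres : bfsLoop solid (steps + 1) V F =
          bfsLoop solid steps (bfsExpand solid F (V, [])).1 (bfsExpand solid F (V, [])).2 := by
        simp [bfsLoop, hFe]
      rw [hres]
      have inv0 : pvInv V (fun _ => False) ((V : PySem.Set (List Int)), ([] : List (Int × Int × Int))) :=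
        ⟨fun w => by simp, List.nodup_nil, fun q => by simp, hV⟩
      obtain ⟨h1, h2, h3, h4⟩ := bfsExpand_inv solid V F (V, []) (fun _ => False) inv0
      have h3' : ∀ q, q ∈ (bfsExpand solid F (V, [])).2 ↔
          (pvAirN solid (fun r => r ∈ F) q ∧ pvTl q ∉ V) := by
        intro q
        rw [h3 q]
        unfold pvAirN
        tauto
      have ha' : ∀ q ∈ (bfsExpand solid F (V, [])).2, pvLvl solid p0 (k + 1) q := by
        intro q hq
        have := ((h3' q).mp hq).1
        exact pvAirN_mono (fun r hr => ha r hr) this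
      have hb' : ∀ q, pvLvl solid p0 (k + 1) q →
          q ∈ (bfsExpand solid F (V, [])).2 ∨ ∃ j, 1 ≤ j ∧ j ≤ (k + 1) - 1 ∧ pvLvl solid p0 j q := by
        intro q hq
        obtain ⟨hair, p, hp, t, ht, he⟩ := (hq : pvAirN solid (pvLvl solid p0 k) q)
        rcases hb p hp with hpF | ⟨j', hj'1, hj'2, hj'l⟩
        · by_cases hqv : pvTl q ∈ V
          · obtain ⟨j, hj1, hj2, q', hq', hw⟩ := (hc _).mp hqv
            obtain rfl : q' = q := pvTl_inj hw.symm
            exact Or.inr ⟨j, hj1, by omega, hq'⟩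
          · exact Or.inl ((h3' q).mpr ⟨⟨hair, p, hpF, t, ht, he⟩, hqv⟩)
        · exact Or.inr ⟨j' + 1, by omega, by omega, ⟨hair, p, hj'l, t, ht, he⟩⟩
      have hc' : ∀ w, w ∈ (bfsExpand solid F (V, [])).1 ↔
          ∃ j, 1 ≤ j ∧ j ≤ k + 1 ∧ ∃ q, pvLvl solid p0 j q ∧ w = pvTl q := by
        intro w
        rw [h1 w]
        constructor
        · rintro (hv | ⟨q, hq, rfl⟩)
          · obtain ⟨j, hj1, hj2, hq⟩ := (hc w).mp hv
            exact ⟨j, hj1, by omega, hq⟩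
          · exact ⟨k + 1, by omega, le_refl _, q, ha' q hq, rfl⟩
        · rintro ⟨j, hj1, hj2, q, hq, hw⟩
          by_cases hjk : j ≤ k
          · exact Or.inl ((hc w).mpr ⟨j, hj1, hjk, q, hq, hw⟩)
          · have : j = k + 1 := by omega
            subst this
            rcases hb' q hq with hmem | ⟨j', hj'1, hj'2, hj'l⟩
            · exact Or.inr ⟨q, hmem, hw⟩
            · exact Or.inl ((hc w).mpr ⟨j', hj'1, by omega, q, hj'l, hw⟩)
      obtain ⟨hn, hm⟩ := ih (k + 1) (bfsExpand solid F (V, [])).1 (bfsExpand solid F (V, [])).2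
        h4 h2 ha' hb' hc'
      refine ⟨hn, fun w => (hm w).trans ?_⟩
      constructor
      · rintro ⟨j, hj1, hj2, hq⟩; exact ⟨j, hj1, by omega, hq⟩
      · rintro ⟨j, hj1, hj2, hq⟩; exact ⟨j, hj1, by omega, hq⟩

-- ===== VERDICT (by name: the statement is the Claim_ definition above) =====
theorem get_air_neighbors_spec : Claim_equal_get_air_neighbors := by
  intro solid x y z d _ _
  unfold Spec_get_air_neighbors get_air_neighbors get_air_neighbors_alt
  rw [pvDf_max]
  have hA := mem_ganAux solid (pvDf d) x y z d rfl
  have hAnodup := nodup_ganAux solid (pvDf d) x y z d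
  have hB := mem_bfsLoop solid (x, y, z) (pvDf d) 0 PySem.Set.empty [(x, y, z)]
    List.nodup_nil (List.nodup_singleton _)
    (by intro q hq
        rw [List.mem_singleton] at hq
        subst hq
        exact (show (x, y, z) = (x, y, z) from rfl))
    (by intro q hq
        exact Or.inl (List.mem_singleton.mpr (hq : q = (x, y, z))))
    (by intro w
        simp only [PySem.Set.empty, List.not_mem_nil, false_iff]
        rintro ⟨j, hj1, hj2, -⟩
        omega)
  have hperm : (ganAux solid (pvDf d) x y z d).Perm
      (bfsLoop solid (pvDf d) PySem.Set.empty [(x, y, z)]) := by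
    rw [List.perm_ext_iff_of_nodup hAnodup hB.1]
    intro w
    rw [hA w, hB.2 w]
    constructor
    · rintro ⟨j, hj1, hj2, hq⟩; exact ⟨j, hj1, by omega, hq⟩
    · rintro ⟨j, hj1, hj2, hq⟩; exact ⟨j, hj1, by omega, hq⟩
  unfold pvCanon
  exact PySem.List.sorted_eq_sorted_of_perm _ _ _ (fun a b h => h) hperm
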